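-- pv_equiv track=rewrite | github.com/Jason-Du/ITRI_python | script_sim/script.py | ajst_lib_revi_retu_idx
-- ===== SOURCE A (Python) =====
-- def ajst_lib_revi_retu_idx(mod_par_dict={},revi_pars=[],retu_pars=[]):
--     """
--     # 原mosfet 參數的集合 {model name :[{par_name:\\\ , par_value\\\ , idx:\\\] }
--     revi_pars是要這次改動的param list [{mod_nam : \\\ , par_name:\\\}]
--     retu_pars 是要更改回來的 param list
--     return 2個參數 一個為要修改的參數在 該model key 下的list 排在哪一個idx 另一個是要改回來的 小單位為[{'MOS_N': 3}, {'MOS_N': 4}]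
--     now_par_idxs [{'DDS': 0}]
--     last_par_idxs [{'MOS_N': 3}, {'MOS_N': 4}]
--     """
--     # 參數需要調整回來
--     now_par_idxs=[]
--     last_par_idxs = []
--     now_par_idx=None
--     for revi_par in revi_pars:# 可能不只一個參數需要調整
--         now_par_idx = next((index for (index, d) in enumerate(mod_par_dict[revi_par["mod_name"]]) if d["par_name"] == revi_par["par_name"]), None)
--         now_par_idxs.append({revi_par["mod_name"]:now_par_idx})
--     if retu_pars is not []:# 第一筆資料不會有修正項
--         for retu_par in retu_pars:# 可能不只一個參數需要調整
--             last_par_idx = next((index for (index, d) in enumerate(mod_par_dict[retu_par["mod_name"]]) if d["par_name"] == retu_par["par_name"]), None)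
--             last_par_idxs.append({retu_par["mod_name"]:last_par_idx})
--     return now_par_idxs,last_par_idxs
-- ===== SOURCE B (Python) =====
-- def ajst_lib_revi_retu_idx(mod_par_dict={}, revi_pars=[], retu_pars=[]):
--     # Stage 1: one pass over the WHOLE parameter database, recording for every
--     # (model, par_name) pair the index of its first occurrence.
--     first = {}
--     for model, lst in mod_par_dict.items():
--         for i, d in enumerate(lst):
--             first.setdefault((model, d.get("par_name")), i)
--     # Stage 2: every query is a constant-time lookup; missing pair -> None.
--     def answer(pars):
--         return [{p["mod_name"]: first.get((p["mod_name"], p["par_name"]))} for p in pars]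
--     return answer(revi_pars), answer(retu_pars)
-- ===== Notes on version B (the rewrite author's own statement) =====
-- stated objective: alternative
-- what changed: B replaces A's per-query linear scan of the referenced model's list by a two-stage algorithm: one pass over the entire mod_par_dict builds a global (model, par_name) -> first-index map, after which every revi/retu query is a single O(1) dictionary lookup.
import Mathlib
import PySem

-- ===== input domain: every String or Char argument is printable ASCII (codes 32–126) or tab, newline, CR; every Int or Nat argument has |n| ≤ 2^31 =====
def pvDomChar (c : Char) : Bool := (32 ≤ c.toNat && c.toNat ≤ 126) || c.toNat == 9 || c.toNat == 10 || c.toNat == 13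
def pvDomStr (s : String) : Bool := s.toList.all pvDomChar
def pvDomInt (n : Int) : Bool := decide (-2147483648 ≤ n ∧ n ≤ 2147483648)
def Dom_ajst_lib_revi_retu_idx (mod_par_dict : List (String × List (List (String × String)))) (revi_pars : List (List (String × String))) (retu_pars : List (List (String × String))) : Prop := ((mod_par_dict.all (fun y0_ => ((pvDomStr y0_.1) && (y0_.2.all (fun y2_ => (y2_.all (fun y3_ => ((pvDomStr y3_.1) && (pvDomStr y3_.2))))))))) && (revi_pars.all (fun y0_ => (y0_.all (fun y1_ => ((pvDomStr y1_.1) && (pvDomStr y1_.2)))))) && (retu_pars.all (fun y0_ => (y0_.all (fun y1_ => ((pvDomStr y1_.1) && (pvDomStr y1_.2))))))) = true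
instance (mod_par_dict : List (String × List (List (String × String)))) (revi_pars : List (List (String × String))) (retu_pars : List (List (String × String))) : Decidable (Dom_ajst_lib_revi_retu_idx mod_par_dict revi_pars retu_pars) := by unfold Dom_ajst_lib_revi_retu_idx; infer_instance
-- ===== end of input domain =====

-- B is a two-stage algorithm: one pass over the whole database builds a global
-- (model, par_name) -> first-index map, then every query is a single lookup;
-- A instead scans the referenced model's list once per query.

-- shared helpers: d["k"] on an association-list dict (first match; Pre_ guarantees the key is
-- present where it matters, so the "" default is never the result of a missing key), and
-- mod_par_dict[m]; pvName? is Python's d.get("par_name")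
def pvName? (d : List (String × String)) : Option String :=
  (d.find? (fun kv => kv.1 == "par_name")).map (·.2)

def pyGetStr (d : List (String × String)) (k : String) : String :=
  ((d.find? (fun kv => kv.1 == k)).map (·.2)).getD ""

def pyModels (mpd : List (String × List (List (String × String)))) (m : String) :
    List (List (String × String)) :=
  ((mpd.find? (fun kv => kv.1 == m)).map (·.2)).getD []

-- ===== PORT A =====
-- literal port: for each par, next((i for (i,d) in enumerate(mod_par_dict[mod]) if d["par_name"]==pn), None),
-- results appended one by one; the `retu_pars is not []` guard is always True in Python, so the
-- second loop runs unconditionally.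
def ajst_lib_revi_retu_idx (mod_par_dict : List (String × List (List (String × String)))) (revi_pars : List (List (String × String))) (retu_pars : List (List (String × String))) : (List (List (String × Option Int))) × (List (List (String × Option Int))) :=
  let now_par_idxs := revi_pars.foldl (fun acc p =>
    let now_par_idx := ((PySem.List.enumerate (pyModels mod_par_dict (pyGetStr p "mod_name"))).find?
        (fun e => pyGetStr e.2 "par_name" == pyGetStr p "par_name")).map (·.1)
    acc ++ [[(pyGetStr p "mod_name", now_par_idx)]]) []
  let last_par_idxs := retu_pars.foldl (fun acc p =>
    let last_par_idx := ((PySem.List.enumerate (pyModels mod_par_dict (pyGetStr p "mod_name"))).find?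
        (fun e => pyGetStr e.2 "par_name" == pyGetStr p "par_name")).map (·.1)
    acc ++ [[(pyGetStr p "mod_name", last_par_idx)]]) []
  (now_par_idxs, last_par_idxs)

-- ===== PORT B =====
-- stage 1 of Source B: the global first-occurrence index of every (model, par_name) pair
def pvFirstIdx (mod_par_dict : List (String × List (List (String × String)))) :
    PySem.Dict (String × Option String) Int :=
  mod_par_dict.foldl
    (fun t me => (PySem.List.enumerate me.2).foldl
      (fun t e => t.setdefault (me.1, pvName? e.2) e.1) t)
    PySem.Dict.empty

-- stage 2 of Source B: answer(pars), a lookup per query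
def pvAnswer (first : PySem.Dict (String × Option String) Int)
    (pars : List (List (String × String))) : List (List (String × Option Int)) :=
  pars.map (fun p =>
    [(pyGetStr p "mod_name", first.get? (pyGetStr p "mod_name", some (pyGetStr p "par_name")))])

def ajst_lib_revi_retu_idx_alt (mod_par_dict : List (String × List (List (String × String)))) (revi_pars : List (List (String × String))) (retu_pars : List (List (String × String))) : (List (List (String × Option Int))) × (List (List (String × Option Int))) :=
  let first := pvFirstIdx mod_par_dict
  (pvAnswer first revi_pars, pvAnswer first retu_pars)

-- ===== PRECONDITION & SPEC =====
-- A query is OK when it has both keys, its model exists, and A's scan of that model's list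
-- never evaluates d["par_name"] on a dict lacking it before finding the match (else A raises
-- KeyError).
def pvQueryOK (mod_par_dict : List (String × List (List (String × String)))) (p : List (String × String)) : Bool :=
  (p.find? (fun kv => kv.1 == "mod_name")).isSome &&
  (p.find? (fun kv => kv.1 == "par_name")).isSome &&
  (mod_par_dict.find? (fun kv => kv.1 == pyGetStr p "mod_name")).isSome &&
  ((pyModels mod_par_dict (pyGetStr p "mod_name")).takeWhile
      (fun d => !(pvName? d == some (pyGetStr p "par_name")))).all
    (fun d => (pvName? d).isSome)

-- Pre_ excludes exactly the inputs where the Python A raises KeyError (a par without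
-- "mod_name"/"par_name", a model name absent from mod_par_dict, or a dict lacking "par_name"
-- scanned before the first match), plus association lists with duplicate model keys, which a
-- Python dict argument can never be.
def Pre_ajst_lib_revi_retu_idx (mod_par_dict : List (String × List (List (String × String)))) (revi_pars : List (List (String × String))) (retu_pars : List (List (String × String))) : Prop :=
  (mod_par_dict.map Prod.fst).Nodup ∧
  ((revi_pars ++ retu_pars).all (pvQueryOK mod_par_dict)) = true
instance (mod_par_dict : List (String × List (List (String × String)))) (revi_pars : List (List (String × String))) (retu_pars : List (List (String × String))) : Decidable (Pre_ajst_lib_revi_retu_idx mod_par_dict revi_pars retu_pars) := by unfold Pre_ajst_lib_revi_retu_idx; infer_instance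

def pvWitness_ajst_lib_revi_retu_idx : (List (String × List (List (String × String)))) × (List (List (String × String))) × (List (List (String × String))) :=
  ([("m", [[("par_name", "a")], [("par_name", "b")]])],
   [[("mod_name", "m"), ("par_name", "b")]],
   [[("mod_name", "m"), ("par_name", "z")]])

def Spec_ajst_lib_revi_retu_idx (mod_par_dict : List (String × List (List (String × String)))) (revi_pars : List (List (String × String))) (retu_pars : List (List (String × String))) (out : (List (List (String × Option Int))) × (List (List (String × Option Int)))) : Prop := out = ajst_lib_revi_retu_idx_alt mod_par_dict revi_pars retu_pars
instance (mod_par_dict : List (String × List (List (String × String)))) (revi_pars : List (List (String × String))) (retu_pars : List (List (String × String))) (out : (List (List (String × Option Int))) × (List (List (String × Option Int)))) : Decidable (Spec_ajst_lib_revi_retu_idx mod_par_dict revi_pars retu_pars out) := by unfold Spec_ajst_lib_revi_retu_idx; infer_instance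

-- ===== CLAIM (what is proved, stated in full; the proofs are below) =====
def Claim_equal_ajst_lib_revi_retu_idx : Prop := ∀ (mod_par_dict : List (String × List (List (String × String)))) (revi_pars : List (List (String × String))) (retu_pars : List (List (String × String))), Dom_ajst_lib_revi_retu_idx mod_par_dict revi_pars retu_pars → Pre_ajst_lib_revi_retu_idx mod_par_dict revi_pars retu_pars → Spec_ajst_lib_revi_retu_idx mod_par_dict revi_pars retu_pars (ajst_lib_revi_retu_idx mod_par_dict revi_pars retu_pars)

-- ===== LEMMAS AND PROOFS =====

-- the inner setdefault loop over one model's list: its effect on a lookup key (m', k)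
theorem inner_fold_get? (mname m' : String) (k : Option String)
    (lst : List (List (String × String))) :
    ∀ (s : Int) (t : PySem.Dict (String × Option String) Int),
      (((PySem.List.enumerate lst s).foldl
          (fun t e => t.setdefault (mname, pvName? e.2) e.1) t).get? (m', k))
      = ((t.get? (m', k)).or
          (if mname == m' then
            (((PySem.List.enumerate lst s).find? (fun e => pvName? e.2 == k)).map (·.1))
          else none)) := by
  induction lst with
  | nil =>
    intro s t
    simp [PySem.List.enumerate_nil]
  | cons d rest ih =>
    intro s t
    rw [PySem.List.enumerate_cons]
    simp only [List.foldl_cons]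
    rw [ih]
    by_cases heq : (m', k) = (mname, pvName? d)
    · have hm : m' = mname := (Prod.mk.injEq _ _ _ _ ▸ heq).1
      have hk : k = pvName? d := (Prod.mk.injEq _ _ _ _ ▸ heq).2
      rw [List.find?_cons_of_pos (by simp [hk])]
      rw [heq, PySem.Dict.get?_setdefault_self]
      have hmm : (mname == m') = true := by simp [hm]
      simp only [hmm, if_true]
      cases hg : t.get? (mname, pvName? d) <;> simp
    · rw [PySem.Dict.get?_setdefault_of_ne _ _ heq]
      by_cases hm : (mname == m') = true
      · have hne2 : (pvName? d == k) = false := by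
          cases hq : (pvName? d == k) with
          | false => rfl
          | true => exact absurd (show (m', k) = (mname, pvName? d) by rw [eq_of_beq hm, eq_of_beq hq]) heq
        simp only [hm, if_true]
        have hskip : List.find? (fun e => pvName? e.2 == k) ((s, d) :: PySem.List.enumerate rest (s + 1))
            = List.find? (fun e => pvName? e.2 == k) (PySem.List.enumerate rest (s + 1)) := by
          rw [List.find?_cons]; simp [hne2]
        rw [hskip]
      · simp [hm]

-- a model name absent from the association list yields the empty parameter list
theorem pyModels_of_not_mem (mpd : List (String × List (List (String × String)))) (m : String)
    (h : m ∉ mpd.map Prod.fst) : pyModels mpd m = [] := by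
  unfold pyModels
  have : mpd.find? (fun kv => kv.1 == m) = none := by
    rw [List.find?_eq_none]
    intro kv hkv hbeq
    exact h (List.mem_map.mpr ⟨kv, hkv, eq_of_beq hbeq⟩)
  simp [this]

-- stage 1 indexes exactly: looking up (m', k) in the global table is the first-match scan of
-- model m''s own list (provided model keys are distinct)
theorem firstIdx_get? (m' : String) (k : Option String) :
    ∀ (mpd : List (String × List (List (String × String))))
      (t : PySem.Dict (String × Option String) Int),
      (mpd.map Prod.fst).Nodup →
      ((mpd.foldl (fun t me => (PySem.List.enumerate me.2).foldl
          (fun t e => t.setdefault (me.1, pvName? e.2) e.1) t) t).get? (m', k))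
      = ((t.get? (m', k)).or
          (((PySem.List.enumerate (pyModels mpd m')).find? (fun e => pvName? e.2 == k)).map (·.1))) := by
  intro mpd
  induction mpd with
  | nil => intro t _; simp [pyModels, PySem.List.enumerate_nil]
  | cons me rest ih =>
    intro t hnd
    have hnd2 : (me.1 :: rest.map Prod.fst).Nodup := by simpa using hnd
    rw [List.foldl_cons, ih _ (List.nodup_cons.mp hnd2).2, inner_fold_get?]
    by_cases hm : (me.1 == m') = true
    · have hnotin : m' ∉ rest.map Prod.fst := eq_of_beq hm ▸ (List.nodup_cons.mp hnd2).1
      rw [pyModels_of_not_mem rest m' hnotin]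
      have h2 : pyModels (me :: rest) m' = me.2 := by
        unfold pyModels; simp [List.find?, hm]
      rw [h2]
      simp [PySem.List.enumerate_nil, hm]
    · have h2 : pyModels (me :: rest) m' = pyModels rest m' := by
        unfold pyModels; simp [List.find?, hm]
      rw [h2]
      simp [hm]

-- under the takeWhile condition of pvQueryOK, A's predicate (via d["par_name"], "" default in
-- the port) and B's predicate (via d.get("par_name")) find the same first index
theorem find_agree (k : String) :
    ∀ (L : List (List (String × String))) (s : Int),
      ((L.takeWhile (fun d => !(pvName? d == some k))).all (fun d => (pvName? d).isSome)) = true →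
      (((PySem.List.enumerate L s).find? (fun e => pyGetStr e.2 "par_name" == k)).map (·.1))
      = (((PySem.List.enumerate L s).find? (fun e => pvName? e.2 == some k)).map (·.1)) := by
  intro L
  induction L with
  | nil => intro s _; simp [PySem.List.enumerate_nil]
  | cons d rest ih =>
    intro s hTW
    rw [PySem.List.enumerate_cons]
    cases h : pvName? d with
    | none =>
      have hpred : (!(pvName? d == some k)) = true := by simp [h]
      simp [h] at hTW
    | some v =>
      have hg : pyGetStr d "par_name" = v := by
        unfold pyGetStr
        have h2 : (d.find? (fun kv => kv.1 == "par_name")).map (·.2) = some v := h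
        simp [h2]
      by_cases hv : (v == k) = true
      · rw [List.find?_cons_of_pos (by simp [hg, hv]),
            List.find?_cons_of_pos (by simp [h]; exact eq_of_beq hv)]
      · have hvf : (v == k) = false := by
          cases hq : (v == k) with
          | false => rfl
          | true => exact absurd hq hv
        have h2 : (pvName? d == some k) = false := by simp [h, hvf]
        have hskipA : List.find? (fun e => pyGetStr e.2 "par_name" == k) ((s, d) :: PySem.List.enumerate rest (s + 1))
            = List.find? (fun e => pyGetStr e.2 "par_name" == k) (PySem.List.enumerate rest (s + 1)) := by
          rw [List.find?_cons]; simp [hg, hvf]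
        have hskipB : List.find? (fun e => pvName? e.2 == some k) ((s, d) :: PySem.List.enumerate rest (s + 1))
            = List.find? (fun e => pvName? e.2 == some k) (PySem.List.enumerate rest (s + 1)) := by
          rw [List.find?_cons]; simp [h2]
        rw [hskipA, hskipB]
        have hpred : (!(pvName? d == some k)) = true := by simp [h2]
        simp only [List.takeWhile_cons, hpred, if_true, List.all_cons, Bool.and_eq_true] at hTW
        exact ih (s + 1) hTW.2
-- per-query agreement of the two ports
theorem query_eq (mpd : List (String × List (List (String × String))))
    (hnd : (mpd.map Prod.fst).Nodup) (p : List (String × String))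
    (hOK : pvQueryOK mpd p = true) :
    (((PySem.List.enumerate (pyModels mpd (pyGetStr p "mod_name"))).find?
        (fun e => pyGetStr e.2 "par_name" == pyGetStr p "par_name")).map (·.1))
    = (pvFirstIdx mpd).get? (pyGetStr p "mod_name", some (pyGetStr p "par_name")) := by
  unfold pvFirstIdx
  rw [firstIdx_get? _ _ _ _ hnd]
  rw [PySem.Dict.get?_empty, Option.none_or]
  unfold pvQueryOK at hOK
  simp only [Bool.and_eq_true] at hOK
  exact find_agree _ _ _ hOK.2

-- ===== VERDICT (by name: the statement is the Claim_ definition above) =====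
theorem ajst_lib_revi_retu_idx_spec : Claim_equal_ajst_lib_revi_retu_idx := by
  intro mod_par_dict revi_pars retu_pars _ hPre
  obtain ⟨hnd, hall⟩ := hPre
  simp only [List.all_append, Bool.and_eq_true, List.all_eq_true] at hall
  unfold Spec_ajst_lib_revi_retu_idx ajst_lib_revi_retu_idx ajst_lib_revi_retu_idx_alt pvAnswer
  simp only [PySem.List.foldl_append_singleton_eq_map, List.nil_append]
  rw [Prod.mk.injEq]
  refine ⟨?_, ?_⟩
  · exact List.map_congr_left (fun p hp => by
      simp only [query_eq mod_par_dict hnd p (hall.1 p hp)])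
  · exact List.map_congr_left (fun p hp => by
      simp only [query_eq mod_par_dict hnd p (hall.2 p hp)])
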